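-- pv_equiv track=rewrite | github.com/BK-notburgerking/Algorithm | Programmers/여행경로.py | solution
-- ===== SOURCE A (Python) =====
-- def solution(tickets):
--     adj = {} #인접리스트
--     for dep, arr in tickets:
--         if adj.get(dep) == None:
--             adj[dep] = [arr]
--         else:
--             adj[dep] += [arr]
--
--     for dep in adj.keys():
--         adj[dep].sort(reverse=True) #가장 위부터 꺼내서 쓸거라 오름차순
--         #가장 위에 사전순 제일 빠른게 올라옴
--
--     s = ["ICN"] # 인천에서 시작
--     ans = []
--     while s:
--         depart = s.pop() #스택에서 꺼냄 -> 출발지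
--         # 만약 출발지가 실제로 출발가능하고 (인접리스트에 키로 존재)
--         # 아직 사용안한 티켓이 있으면 (밸류의 길이가 양수)
--         if depart in adj and len(adj[depart]) > 0:
--             s.append(depart) #다시 스택에 넣어주고
--             s.append(adj[depart].pop()) #가장 위에있는 티켓을 스택에 넣어줌
--         else: # 해당 출발지에서 출발하는 티켓이 없는 경우
--             # 바로 정답에 넣어줌
--             # 왜냐하면 더이상 갈곳이 없기때문에 굳이 스택에 넣어서 탐색할 필요가 없음
--             ans.append(depart)
--
--     return ans[::-1]
-- ===== SOURCE B (Python) =====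
-- def solution(tickets):
--     adj = {}
--     for dep, arr in tickets:
--         adj.setdefault(dep, []).append(arr)
--     adj = {k: sorted(v) for k, v in adj.items()}
--     route = []
--     def visit(node):
--         while adj.get(node):
--             visit(adj[node].pop(0))
--         route.insert(0, node)
--     visit("ICN")
--     return route
-- ===== Notes on version B (the rewrite author's own statement) =====
-- stated objective: alternative
-- what changed: Replaces A's explicit-stack while-loop over reverse-sorted adjacency lists (pop from the back, append dead-ends, reverse at the end) with a recursive Hierholzer visit over ascending-sorted lists rebuilt by a dict comprehension, consuming each list from the FRONT and prepending nodes to the route so no final reversal is needed.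
import Mathlib
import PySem

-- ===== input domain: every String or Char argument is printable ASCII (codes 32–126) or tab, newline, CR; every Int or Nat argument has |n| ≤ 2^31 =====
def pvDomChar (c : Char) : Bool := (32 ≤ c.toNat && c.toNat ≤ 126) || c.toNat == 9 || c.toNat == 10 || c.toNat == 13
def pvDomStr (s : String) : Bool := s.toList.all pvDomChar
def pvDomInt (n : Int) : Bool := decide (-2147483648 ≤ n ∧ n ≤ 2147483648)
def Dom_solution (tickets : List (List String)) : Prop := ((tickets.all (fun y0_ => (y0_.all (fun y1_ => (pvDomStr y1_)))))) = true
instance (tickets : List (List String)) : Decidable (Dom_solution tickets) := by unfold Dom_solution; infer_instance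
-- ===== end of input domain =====

-- B replaces A's explicit-stack loop over reverse-sorted lists (pop from the back, reverse the answer at the end)
-- by a recursive Hierholzer visit over ascending lists consumed from the front, prepending to the route (no final reverse).

-- ===== PORT A =====
-- adj = {}; for dep, arr in tickets: if adj.get(dep) == None: adj[dep] = [arr] else: adj[dep] += [arr]
def buildA (tickets : List (List String)) : PySem.Dict String (List String) :=
  tickets.foldl (fun adj t =>
    match t with
    | [dep, arr] =>
      match adj.get? dep with
      | none => adj.insert dep [arr]
      | some l => adj.insert dep (l ++ [arr])
    | _ => adj) PySem.Dict.empty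

-- for dep in adj.keys(): adj[dep].sort(reverse=True)
def sortA (adj : PySem.Dict String (List String)) : PySem.Dict String (List String) :=
  adj.keys.foldl (fun d k => d.modify k [] (fun l => PySem.List.sorted l (fun x => x) true)) adj

-- while s: depart = s.pop(); if depart in adj and len(adj[depart]) > 0: s.append(depart); s.append(adj[depart].pop()) else: ans.append(depart)
-- fuel is only a totality guard; the 'none' inner branch is unreachable (the guard ensures the list is nonempty)
def loopA : Nat → PySem.Dict String (List String) → List String → List String → List String
  | 0, _, _, ans => ans
  | fuel+1, adj, s, ans =>
    match PySem.List.pop? s with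
    | none => ans
    | some (depart, s') =>
      if adj.contains depart && decide (0 < (adj.getD depart []).length) then
        match PySem.List.pop? (adj.getD depart []) with
        | some (x, rest) => loopA fuel (adj.insert depart rest) (s' ++ [depart, x]) ans
        | none => ans
      else
        loopA fuel adj s' (ans ++ [depart])

def solution (tickets : List (List String)) : List String :=
  (loopA (2 * tickets.length + 2) (sortA (buildA tickets)) ["ICN"] []).reverse

-- ===== PORT B =====
-- adj = {}; for dep, arr in tickets: adj.setdefault(dep, []).append(arr)
def buildB (tickets : List (List String)) : PySem.Dict String (List String) :=
  tickets.foldl (fun adj t =>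
    match t with
    | [dep, arr] => adj.modify dep [] (fun l => l ++ [arr])
    | _ => adj) PySem.Dict.empty

-- adj = {k: sorted(v) for k, v in adj.items()}
def sortB (adj : PySem.Dict String (List String)) : PySem.Dict String (List String) :=
  PySem.Dict.mk (adj.items.map (fun p => (p.1, PySem.List.sorted p.2 (fun x => x) false)))

-- def visit(node): while adj.get(node): visit(adj[node].pop(0)); route.insert(0, node)
-- fuel is only a totality guard (proved sufficient below)
def visitB : Nat → String → PySem.Dict String (List String) → List String → PySem.Dict String (List String) × List String
  | 0, _, adj, route => (adj, route)
  | fuel+1, node, adj, route =>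
    match adj.getD node [] with
    | [] => (adj, node :: route)
    | nxt :: rest =>
      let p := visitB fuel nxt (adj.insert node rest) route
      visitB fuel node p.1 p.2

def solution_alt (tickets : List (List String)) : List String :=
  (visitB (2 * tickets.length + 1) "ICN" (sortB (buildB tickets)) []).2

-- ===== PRECONDITION & SPEC =====
-- Pre_ excludes exactly the inputs where A raises: 'for dep, arr in tickets' raises ValueError unless every ticket has exactly 2 fields.
def Pre_solution (tickets : List (List String)) : Prop := ∀ t ∈ tickets, t.length = 2
instance (tickets : List (List String)) : Decidable (Pre_solution tickets) := by unfold Pre_solution; infer_instance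
def pvWitness_solution : List (List String) := [["ICN", "AAA"], ["AAA", "ICN"]]

def Spec_solution (tickets : List (List String)) (out : List String) : Prop := out = solution_alt tickets
instance (tickets : List (List String)) (out : List String) : Decidable (Spec_solution tickets out) := by unfold Spec_solution; infer_instance

-- ===== CLAIM (what is proved, stated in full; the proofs are below) =====
def Claim_equal_solution : Prop := ∀ (tickets : List (List String)), Dom_solution tickets → Pre_solution tickets → Spec_solution tickets (solution tickets)

-- ===== LEMMAS AND PROOFS =====

theorem contains_iff_get?_isSome (d : PySem.Dict String (List String)) (k : String) :
    d.contains k = true ↔ (d.get? k).isSome := by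
  simp [PySem.Dict.contains, PySem.Dict.get?, List.any_eq_true, List.find?_isSome]

theorem get?_eq_getD_of_ne_nil (d : PySem.Dict String (List String)) (k : String)
    (h : d.getD k [] ≠ []) : d.get? k = some (d.getD k []) := by
  cases hg : d.get? k with
  | none => simp [PySem.Dict.getD, hg] at h
  | some l => simp [PySem.Dict.getD, hg]

theorem nodup_insert (d : PySem.Dict String (List String)) (k : String) (v : List String)
    (h : d.keys.Nodup) : (d.insert k v).keys.Nodup := by
  by_cases hc : d.contains k = true
  · have : (d.insert k v).keys = d.keys := by
      simp only [PySem.Dict.insert, hc, if_pos, PySem.Dict.keys, List.map_map]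
      refine List.map_congr_left ?_
      intro p _
      by_cases hp : (p.1 == k) = true
      · simp [Function.comp, (eq_of_beq hp).symm]
      · simp [Function.comp, hp]
    rwa [this]
  · have hk : ∀ p ∈ d.items, p.1 ≠ k := by
      simp only [PySem.Dict.contains, List.any_eq_true, not_exists] at hc
      intro p hp hpk
      exact hc p ⟨hp, by simp [hpk]⟩
    have hc' : d.contains k = false := by simpa using hc
    simp only [PySem.Dict.insert, hc', Bool.false_eq_true, if_false, PySem.Dict.keys, List.map_append]
    rw [List.nodup_append]
    refine ⟨h, by simp, ?_⟩
    intro a ha b hb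
    have hb' : b = k := by simpa using hb
    obtain ⟨p, hp, rfl⟩ := List.mem_map.mp ha
    subst hb'
    exact hk p hp

-- total number of unused tickets in the adjacency dict (proof-only)
def sizeD (d : PySem.Dict String (List String)) : Nat := (d.values.map List.length).sum

-- canonical-fuel runner for A's loop (proof-only)
def runA (adj : PySem.Dict String (List String)) (s ans : List String) : List String :=
  loopA (2 * sizeD adj + s.length + 1) adj s ans

theorem sizeD_insert_new (d : PySem.Dict String (List String)) (k : String) (v : List String)
    (h : d.contains k = false) : sizeD (d.insert k v) = sizeD d + v.length := by
  simp [PySem.Dict.insert, h, sizeD, PySem.Dict.values]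

theorem map_replace_eq_self (k : String) (v : List String) (tl : List (String × List String))
    (hk : ∀ q ∈ tl, (q.1 == k) = false) :
    tl.map (fun p => if (p.1 == k) = true then (k, v) else p) = tl := by
  rw [show tl = tl.map id by simp]
  rw [List.map_map]
  refine List.map_congr_left ?_
  intro q hq
  have hne : ¬ (q.1 == k) = true := by simp [hk q (by simpa using hq)]
  show (if (q.1 == k) = true then (k, v) else q) = q
  rw [if_neg hne]

theorem sizeD_ins_aux (k : String) (l v : List String) :
    ∀ ps : List (String × List String),
      (ps.map Prod.fst).Nodup → (PySem.Dict.mk ps).get? k = some l →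
      sizeD ((PySem.Dict.mk ps).insert k v) + l.length = sizeD (PySem.Dict.mk ps) + v.length := by
  intro ps
  induction ps with
  | nil => intro _ h; simp [PySem.Dict.get?] at h
  | cons p tl ih =>
    obtain ⟨pk, pv⟩ := p
    intro hnd h
    by_cases hpk : (pk == k) = true
    · have hl : pv = l := by simpa [PySem.Dict.get?_mk_cons, hpk] using h
      have hkeq : pk = k := eq_of_beq hpk
      have hnotl : ∀ q ∈ tl, (q.1 == k) = false := by
        intro q hq
        have : q.1 ≠ k := by
          rintro rfl
          exact (List.nodup_cons.mp hnd).1 (by simpa [hkeq] using List.mem_map_of_mem hq (f := Prod.fst))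
        simpa using this
      have hc : (PySem.Dict.mk ((pk, pv) :: tl)).contains k = true := by
        simp [PySem.Dict.contains_mk, List.any_cons, hpk]
      simp only [PySem.Dict.insert, hc, if_pos, List.map_cons, hpk, if_pos,
        map_replace_eq_self k v tl hnotl]
      simp [sizeD, PySem.Dict.values_mk, ← hl]
      omega
    · have h' : (PySem.Dict.mk tl).get? k = some l := by
        simpa [PySem.Dict.get?_mk_cons, hpk] using h
      have hct : (PySem.Dict.mk tl).contains k = true := by
        rw [contains_iff_get?_isSome]; simp [h']
      have hc : (PySem.Dict.mk ((pk, pv) :: tl)).contains k = true := by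
        simp [PySem.Dict.contains_mk, List.any_cons]
        simp [PySem.Dict.contains_mk] at hct
        tauto
      have ihr := ih (List.nodup_cons.mp hnd).2 h'
      simp only [PySem.Dict.insert, hct, if_pos] at ihr
      simp only [PySem.Dict.insert, hc, if_pos, List.map_cons, hpk]
      simp only [sizeD, PySem.Dict.values_mk, List.map_cons, List.map_map, List.sum_cons] at ihr ⊢
      simp only [Bool.false_eq_true, if_false]
      omega

theorem sizeD_insert_existing (d : PySem.Dict String (List String)) (k : String) (l v : List String)
    (hnd : d.keys.Nodup) (h : d.get? k = some l) :
    sizeD (d.insert k v) + l.length = sizeD d + v.length := by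
  obtain ⟨ps⟩ := d
  exact sizeD_ins_aux k l v ps (by simpa [PySem.Dict.keys] using hnd) h

-- proof-only names for A's two build/sort steps
def stepA (adj : PySem.Dict String (List String)) (t : List String) :
    PySem.Dict String (List String) :=
  match t with
  | [dep, arr] =>
    match adj.get? dep with
    | none => adj.insert dep [arr]
    | some l => adj.insert dep (l ++ [arr])
  | _ => adj

theorem buildA_eq_foldl (tickets : List (List String)) :
    buildA tickets = tickets.foldl stepA PySem.Dict.empty := rfl

def sortStep (d : PySem.Dict String (List String)) (k : String) :
    PySem.Dict String (List String) :=
  d.modify k [] (fun l => PySem.List.sorted l (fun x => x) true)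

theorem sortA_eq_foldl (d : PySem.Dict String (List String)) :
    sortA d = d.keys.foldl sortStep d := rfl

theorem buildA_eq_buildB (tickets : List (List String)) : buildA tickets = buildB tickets := by
  unfold buildA buildB
  congr 1
  funext adj t
  cases t with
  | nil => rfl
  | cons a t1 =>
    cases t1 with
    | nil => rfl
    | cons b t2 =>
      cases t2 with
      | nil =>
        show (match adj.get? a with
              | none => adj.insert a [b]
              | some l => adj.insert a (l ++ [b])) = adj.modify a [] (fun l => l ++ [b])
        cases hg : adj.get? a with
        | none => simp [PySem.Dict.modify, PySem.Dict.getD, hg]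
        | some l => simp [PySem.Dict.modify, PySem.Dict.getD, hg]
      | cons c t3 => rfl

theorem contains_false_of_get?_none (d : PySem.Dict String (List String)) (k : String)
    (h : d.get? k = none) : d.contains k = false := by
  rw [← Bool.not_eq_true, contains_iff_get?_isSome, h]
  simp

theorem stepA_inv (d : PySem.Dict String (List String)) (t : List String) (h : d.keys.Nodup) :
    (stepA d t).keys.Nodup ∧ sizeD (stepA d t) ≤ sizeD d + 1 := by
  cases t with
  | nil => exact ⟨h, by simp [stepA]⟩
  | cons a t1 =>
    cases t1 with
    | nil => exact ⟨h, by simp [stepA]⟩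
    | cons b t2 =>
      cases t2 with
      | nil =>
        cases hg : d.get? a with
        | none =>
          simp only [stepA, hg]
          refine ⟨nodup_insert _ _ _ h, ?_⟩
          rw [sizeD_insert_new _ _ _ (contains_false_of_get?_none _ _ hg)]
          simp
        | some l =>
          simp only [stepA, hg]
          refine ⟨nodup_insert _ _ _ h, ?_⟩
          have := sizeD_insert_existing d a l (l ++ [b]) h hg
          simp only [List.length_append, List.length_cons, List.length_nil] at this
          omega
      | cons c t3 => exact ⟨h, by simp [stepA]⟩

theorem foldl_stepA_inv (ts : List (List String)) :
    ∀ d : PySem.Dict String (List String), d.keys.Nodup →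
      (ts.foldl stepA d).keys.Nodup ∧ sizeD (ts.foldl stepA d) ≤ sizeD d + ts.length := by
  induction ts with
  | nil => intro d h; exact ⟨h, by simp⟩
  | cons t ts ih =>
    intro d h
    obtain ⟨h1, h2⟩ := stepA_inv d t h
    obtain ⟨h3, h4⟩ := ih (stepA d t) h1
    exact ⟨h3, by simp [List.foldl_cons]; omega⟩

theorem build_invariant (tickets : List (List String)) :
    (buildA tickets).keys.Nodup ∧ sizeD (buildA tickets) ≤ tickets.length := by
  rw [buildA_eq_foldl]
  have := foldl_stepA_inv tickets PySem.Dict.empty (by simp [PySem.Dict.empty, PySem.Dict.keys])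
  have hz : sizeD PySem.Dict.empty = 0 := by simp [PySem.Dict.empty, sizeD, PySem.Dict.values]
  exact ⟨this.1, by omega⟩

-- descending sort is the reverse of the ascending sort (identity key on strings)
theorem sorted_rev_eq_reverse (v : List String) :
    PySem.List.sorted v (fun x => x) true = (PySem.List.sorted v (fun x => x) false).reverse := by
  have h : PySem.List.sorted v (fun x => x) false
      = (PySem.List.sorted v (fun x => x) true).reverse := by
    apply PySem.List.sorted_id_eq_of_perm_of_pairwise
    · exact (List.reverse_perm _).trans (PySem.List.sorted_perm _ _ _)
    · rw [List.pairwise_reverse]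
      exact PySem.List.sorted_pairwise_rev v (fun x => x)
  rw [h, List.reverse_reverse]

-- get? on a literal dict ignores a prefix whose keys avoid k
theorem get?_mk_append (k : String) (qs ps : List (String × List String))
    (h : ∀ q ∈ qs, (q.1 == k) = false) :
    (PySem.Dict.mk (qs ++ ps)).get? k = (PySem.Dict.mk ps).get? k := by
  induction qs with
  | nil => rfl
  | cons q tl ih =>
    rw [List.cons_append, PySem.Dict.get?_mk_cons, if_neg (by simp [h q (by simp)]),
      ih (fun q hq => h q (by simp [hq]))]

-- A's for-each-key sort loop is the per-item map (Nodup keys): the heart of sortA vs sortB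
theorem foldl_modify_all (f : List String → List String) :
    ∀ (ps qs : List (String × List String)), ((qs ++ ps).map Prod.fst).Nodup →
      (ps.map Prod.fst).foldl (fun d k => d.modify k [] f) (PySem.Dict.mk (qs ++ ps))
        = PySem.Dict.mk (qs ++ ps.map (fun p => (p.1, f p.2))) := by
  intro ps
  induction ps with
  | nil => intro qs _; simp
  | cons p ps' ih =>
    obtain ⟨k, v⟩ := p
    intro qs hnd
    rw [List.map_append] at hnd
    obtain ⟨hq1, hq2, hdisj⟩ := List.nodup_append.mp hnd
    have hqs : ∀ q ∈ qs, (q.1 == k) = false := by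
      intro q hq
      have : q.1 ≠ k := by
        intro hEq
        exact hdisj q.1 (List.mem_map_of_mem hq (f := Prod.fst)) k (by simp) hEq
      simpa using this
    have hknotin : k ∉ ps'.map Prod.fst := (List.nodup_cons.mp (by simpa using hq2)).1
    have hps' : ∀ q ∈ ps', (q.1 == k) = false := by
      intro q hq
      have : q.1 ≠ k := by
        intro hEq
        exact hknotin (hEq ▸ List.mem_map_of_mem hq (f := Prod.fst))
      simpa using this
    have hget : (PySem.Dict.mk (qs ++ (k, v) :: ps')).getD k [] = v := by
      rw [PySem.Dict.getD_eq_get?_getD, get?_mk_append k qs _ hqs, PySem.Dict.get?_mk_cons]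
      simp
    have hcont : (PySem.Dict.mk (qs ++ (k, v) :: ps')).contains k = true := by
      rw [contains_iff_get?_isSome, get?_mk_append k qs _ hqs, PySem.Dict.get?_mk_cons]
      simp
    have hstep : (PySem.Dict.mk (qs ++ (k, v) :: ps')).modify k [] f
        = PySem.Dict.mk ((qs ++ [(k, f v)]) ++ ps') := by
      rw [PySem.Dict.modify, hget]
      simp only [PySem.Dict.insert, hcont, if_pos, List.map_append, List.map_cons]
      rw [map_replace_eq_self k (f v) qs hqs, map_replace_eq_self k (f v) ps' hps']
      simp
    simp only [List.map_cons, List.foldl_cons, hstep]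
    have hnd' : (((qs ++ [(k, f v)]) ++ ps').map Prod.fst).Nodup := by
      have he : ((qs ++ [(k, f v)]) ++ ps').map Prod.fst = (qs ++ (k, v) :: ps').map Prod.fst := by
        simp
      rw [he, List.map_append]
      exact List.nodup_append.mpr ⟨hq1, hq2, hdisj⟩
    rw [ih (qs ++ [(k, f v)]) hnd']
    simp

theorem mk_items (d : PySem.Dict String (List String)) : PySem.Dict.mk d.items = d := by
  apply PySem.Dict.ext
  rfl

-- pointwise-reversed dict (proof-only): relates A's descending lists to B's ascending ones
def revD (d : PySem.Dict String (List String)) : PySem.Dict String (List String) :=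
  PySem.Dict.mk (d.items.map (fun p => (p.1, p.2.reverse)))

theorem keys_revD (d : PySem.Dict String (List String)) : (revD d).keys = d.keys := by
  simp [revD, PySem.Dict.keys, List.map_map, Function.comp]

theorem get?_revD (d : PySem.Dict String (List String)) (k : String) :
    (revD d).get? k = (d.get? k).map List.reverse := by
  obtain ⟨ps⟩ := d
  induction ps with
  | nil => rfl
  | cons p tl ih =>
    obtain ⟨pk, pv⟩ := p
    show (PySem.Dict.mk ((pk, pv.reverse) :: tl.map _)).get? k = _
    rw [PySem.Dict.get?_mk_cons, PySem.Dict.get?_mk_cons]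
    by_cases hpk : (pk == k) = true
    · simp [hpk]
    · simp only [hpk, Bool.false_eq_true, if_false]
      exact ih

theorem getD_revD (d : PySem.Dict String (List String)) (k : String) :
    (revD d).getD k [] = (d.getD k []).reverse := by
  rw [PySem.Dict.getD_eq_get?_getD, PySem.Dict.getD_eq_get?_getD, get?_revD]
  cases d.get? k <;> simp

theorem revD_revD (d : PySem.Dict String (List String)) : revD (revD d) = d := by
  apply PySem.Dict.ext
  show (d.items.map _).map _ = d.items
  rw [List.map_map]
  refine (List.map_congr_left ?_).trans (List.map_id d.items)
  intro p _
  simp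

theorem sizeD_revD (d : PySem.Dict String (List String)) : sizeD (revD d) = sizeD d := by
  simp only [sizeD, revD, PySem.Dict.values, List.map_map]
  refine congrArg List.sum (List.map_congr_left ?_)
  intro p _
  simp [Function.comp]

theorem revD_insert (d : PySem.Dict String (List String)) (k : String) (v : List String) :
    revD (d.insert k v) = (revD d).insert k v.reverse := by
  have hcc : (revD d).contains k = d.contains k := by
    simp only [PySem.Dict.contains, revD, List.any_map]
    exact congrArg d.items.any (funext fun p => by simp [Function.comp])
  apply PySem.Dict.ext
  show (d.insert k v).items.map _ = ((revD d).insert k v.reverse).items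
  by_cases hc : d.contains k = true
  · rw [PySem.Dict.items_insert_of_contains _ _ hc,
      PySem.Dict.items_insert_of_contains _ _ (by rw [hcc]; exact hc)]
    show _ = (d.items.map _).map _
    rw [List.map_map, List.map_map]
    refine List.map_congr_left ?_
    intro p _
    by_cases hpk : (p.1 == k) = true
    · simp [Function.comp, hpk]
    · simp [Function.comp, hpk]
  · have hc' : d.contains k = false := by simpa using hc
    rw [PySem.Dict.items_insert_of_not_contains _ _ hc',
      PySem.Dict.items_insert_of_not_contains _ _ (by rw [hcc]; exact hc')]
    simp [revD]

-- sortA equals the pointwise reverse of sortB (on a Nodup-keyed dict)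
theorem sortA_eq_revD_sortB (d : PySem.Dict String (List String)) (h : d.keys.Nodup) :
    sortA d = revD (sortB d) := by
  have h0 := foldl_modify_all (fun l => PySem.List.sorted l (fun x => x) true) d.items []
    (by simpa [PySem.Dict.keys] using h)
  rw [List.nil_append, List.nil_append, mk_items] at h0
  have h1 : sortA d = (d.items.map Prod.fst).foldl
      (fun d k => PySem.Dict.modify d k [] (fun l => PySem.List.sorted l (fun x => x) true)) d := rfl
  rw [h1, h0]
  show _ = PySem.Dict.mk ((d.items.map _).map _)
  rw [List.map_map]
  congr 1
  refine List.map_congr_left ?_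
  intro p _
  show (p.1, PySem.List.sorted p.2 (fun x => x) true)
      = (p.1, (PySem.List.sorted p.2 (fun x => x) false).reverse)
  rw [sorted_rev_eq_reverse]

theorem sortStep_inv (d : PySem.Dict String (List String)) (k : String) (h : d.keys.Nodup) :
    (sortStep d k).keys.Nodup ∧ sizeD (sortStep d k) = sizeD d := by
  unfold sortStep PySem.Dict.modify
  refine ⟨nodup_insert _ _ _ h, ?_⟩
  cases hg : d.get? k with
  | none =>
    rw [sizeD_insert_new _ _ _ (contains_false_of_get?_none _ _ hg)]
    simp [PySem.Dict.getD, hg]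
  | some l =>
    have hl : d.getD k [] = l := by simp [PySem.Dict.getD, hg]
    have hb : ((fun l => PySem.List.sorted l (fun x => x) true) (d.getD k []))
        = PySem.List.sorted l (fun x => x) true := by rw [hl]
    rw [hb]
    have := sizeD_insert_existing d k l (PySem.List.sorted l (fun x => x) true) h hg
    rw [PySem.List.length_sorted] at this
    omega

theorem foldl_sortStep_inv (ks : List String) :
    ∀ d : PySem.Dict String (List String), d.keys.Nodup →
      (ks.foldl sortStep d).keys.Nodup ∧ sizeD (ks.foldl sortStep d) = sizeD d := by
  induction ks with
  | nil => intro d h; exact ⟨h, rfl⟩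
  | cons k ks ih =>
    intro d h
    obtain ⟨h1, h2⟩ := sortStep_inv d k h
    obtain ⟨h3, h4⟩ := ih (sortStep d k) h1
    exact ⟨h3, by simp [List.foldl_cons]; omega⟩

theorem sort_invariant (d : PySem.Dict String (List String)) (h : d.keys.Nodup) :
    (sortA d).keys.Nodup ∧ sizeD (sortA d) = sizeD d := by
  rw [sortA_eq_foldl]
  exact foldl_sortStep_inv d.keys d h

theorem pop?_nil : PySem.List.pop? ([] : List String) = none := by
  simp [PySem.List.pop?, PySem.List.pyIdx?]

theorem loopA_step (fuel : Nat) (adj : PySem.Dict String (List String)) (s ans : List String) :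
    loopA (fuel + 1) adj s ans =
      (match PySem.List.pop? s with
      | none => ans
      | some (depart, s') =>
        if adj.contains depart && decide (0 < (adj.getD depart []).length) then
          match PySem.List.pop? (adj.getD depart []) with
          | some (x, rest) => loopA fuel (adj.insert depart rest) (s' ++ [depart, x]) ans
          | none => ans
        else
          loopA fuel adj s' (ans ++ [depart])) := rfl

theorem visitB_step (fuel : Nat) (node : String) (adj : PySem.Dict String (List String))
    (route : List String) :
    visitB (fuel + 1) node adj route =
      (match adj.getD node [] with
      | [] => (adj, node :: route)
      | nxt :: rest =>
        let p := visitB fuel nxt (adj.insert node rest) route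
        visitB fuel node p.1 p.2) := rfl

-- consuming one ticket shrinks the dict by exactly one (B side)
theorem sizeD_consume (adj : PySem.Dict String (List String)) (node nxt : String)
    (rest : List String) (h : adj.keys.Nodup)
    (hg : adj.getD node [] = nxt :: rest) :
    sizeD (adj.insert node rest) + 1 = sizeD adj := by
  have hG : adj.get? node = some (nxt :: rest) := by
    rw [← hg]; exact get?_eq_getD_of_ne_nil _ _ (by rw [hg]; simp)
  have := sizeD_insert_existing adj node (nxt :: rest) rest h hG
  simp only [List.length_cons] at this
  omega

theorem visitB_invariant (fuel : Nat) :
    ∀ (node : String) (adj : PySem.Dict String (List String)) (route : List String),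
      adj.keys.Nodup →
      sizeD (visitB fuel node adj route).1 ≤ sizeD adj ∧ (visitB fuel node adj route).1.keys.Nodup := by
  induction fuel with
  | zero => intro node adj route h; exact ⟨le_refl _, h⟩
  | succ fuel ih =>
    intro node adj route h
    rw [visitB_step]
    cases hg : adj.getD node [] with
    | nil => exact ⟨le_refl _, h⟩
    | cons nxt rest =>
      have hsz := sizeD_consume adj node nxt rest h hg
      have hnd1 := nodup_insert adj node rest h
      obtain ⟨ha1, hb1⟩ := ih nxt (adj.insert node rest) route hnd1
      obtain ⟨ha2, hb2⟩ := ih node (visitB fuel nxt (adj.insert node rest) route).1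
        (visitB fuel nxt (adj.insert node rest) route).2 hb1
      dsimp only
      exact ⟨by omega, hb2⟩

theorem loopA_fuel_succ (fuel : Nat) :
    ∀ (adj : PySem.Dict String (List String)) (s ans : List String), adj.keys.Nodup →
      2 * sizeD adj + s.length ≤ fuel → loopA (fuel + 1) adj s ans = loopA fuel adj s ans := by
  induction fuel with
  | zero =>
    intro adj s ans h hle
    have hs : s = [] := by
      cases s with
      | nil => rfl
      | cons a s' => simp at hle
    subst hs
    rw [loopA_step, pop?_nil]
    rfl
  | succ fuel ih =>
    intro adj s ans h hle
    rcases List.eq_nil_or_concat' s with rfl | ⟨s', x, rfl⟩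
    · rw [loopA_step, loopA_step, pop?_nil]
    · have hpop : PySem.List.pop? (s' ++ [x]) = some (x, s') := PySem.List.pop?_last s' x
      have hlen : (s' ++ [x]).length = s'.length + 1 := by simp
      rw [loopA_step (fuel + 1), loopA_step fuel, hpop]
      by_cases hb : (adj.contains x && decide (0 < (adj.getD x []).length)) = true
      · simp only [hb, if_pos]
        have hne : adj.getD x [] ≠ [] := by
          intro hnil
          rw [hnil] at hb
          simp at hb
        rcases List.eq_nil_or_concat' (adj.getD x []) with hnil | ⟨l', y, hcat⟩
        · exact absurd hnil hne
        · have hp2 : PySem.List.pop? (adj.getD x []) = some (y, l') := by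
            rw [hcat]; exact PySem.List.pop?_last l' y
          rw [hp2]
          have hne2 : adj.getD x [] ≠ [] := hne
          have hG : adj.get? x = some (adj.getD x []) := get?_eq_getD_of_ne_nil _ _ hne2
          have hsz : sizeD (adj.insert x l') + (adj.getD x []).length = sizeD adj + l'.length :=
            sizeD_insert_existing adj x _ l' h hG
          have hlen2 : (adj.getD x []).length = l'.length + 1 := by rw [hcat]; simp
          exact ih _ _ _ (nodup_insert adj x l' h)
            (by simp only [List.length_append, List.length_cons, List.length_nil] at hle ⊢; omega)
      · simp only [hb, Bool.false_eq_true, if_false]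
        exact ih _ _ _ h
          (by simp only [List.length_append, List.length_cons, List.length_nil] at hle ⊢; omega)

theorem loopA_ge (adj : PySem.Dict String (List String)) (s ans : List String)
    (h : adj.keys.Nodup) :
    ∀ m, 2 * sizeD adj + s.length + 1 ≤ m →
      loopA m adj s ans = loopA (2 * sizeD adj + s.length + 1) adj s ans := by
  intro m
  induction m with
  | zero => intro hm; omega
  | succ m ih =>
    intro hm
    rcases Nat.lt_or_ge (2 * sizeD adj + s.length + 1) (m + 1) with hlt | hge
    · have h1 : 2 * sizeD adj + s.length ≤ m := by omega
      rw [loopA_fuel_succ m adj s ans h h1]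
      exact ih (by omega)
    · have : m + 1 = 2 * sizeD adj + s.length + 1 := by omega
      rw [this]

theorem loopA_eq_runA (fuel : Nat) (adj : PySem.Dict String (List String)) (s ans : List String)
    (h : adj.keys.Nodup) (hf : 2 * sizeD adj + s.length + 1 ≤ fuel) :
    loopA fuel adj s ans = runA adj s ans := by
  rw [runA]
  exact loopA_ge adj s ans h fuel hf

-- the simulation: one recursive visit of B (on the reversed dict, reversed answer)
-- corresponds to A's stack loop processing the segment above `node`
theorem key_sim (fB : Nat) :
    ∀ (adj : PySem.Dict String (List String)) (node : String) (s ans : List String),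
      adj.keys.Nodup → 2 * sizeD adj + 1 ≤ fB →
      runA adj (s ++ [node]) ans
        = runA (revD (visitB fB node (revD adj) ans.reverse).1) s
            ((visitB fB node (revD adj) ans.reverse).2).reverse := by
  induction fB with
  | zero => intro adj node s ans h hle; omega
  | succ fB ih =>
    intro adj node s ans h hle
    rw [visitB_step]
    rw [getD_revD]
    cases hg : (adj.getD node []).reverse with
    | nil =>
      have hnil : adj.getD node [] = [] := by
        have := congrArg List.reverse hg
        simpa using this
      dsimp only
      rw [revD_revD]
      rw [runA, runA, loopA_step, PySem.List.pop?_last]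
      have hbf : (adj.contains node && decide (0 < (adj.getD node []).length)) = false := by
        simp [hnil]
      simp only [hbf, Bool.false_eq_true, if_false]
      have hfe : 2 * sizeD adj + (s ++ [node]).length = 2 * sizeD adj + s.length + 1 := by
        simp only [List.length_append, List.length_cons, List.length_nil]
        omega
      rw [hfe]
      simp
    | cons nxt rest =>
      have hfull : adj.getD node [] = rest.reverse ++ [nxt] := by
        have := congrArg List.reverse hg
        simpa using this
      dsimp only
      have hne : adj.getD node [] ≠ [] := by rw [hfull]; simp
      have hG : adj.get? node = some (adj.getD node []) := get?_eq_getD_of_ne_nil _ _ hne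
      have hguard : (adj.contains node && decide (0 < (adj.getD node []).length)) = true := by
        have hc : adj.contains node = true := by
          rw [contains_iff_get?_isSome, hG]; rfl
        have hl : 0 < (adj.getD node []).length := List.length_pos_iff.mpr hne
        simp [hc, hl]
      have hpopA : PySem.List.pop? (adj.getD node []) = some (nxt, rest.reverse) := by
        rw [hfull]; exact PySem.List.pop?_last rest.reverse nxt
      have hsz : sizeD (adj.insert node rest.reverse) + 1 = sizeD adj := by
        have := sizeD_insert_existing adj node (adj.getD node []) rest.reverse h hG
        have hlen : (adj.getD node []).length = rest.length + 1 := by rw [hfull]; simp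
        simp only [List.length_reverse] at this
        omega
      have hnd1 : (adj.insert node rest.reverse).keys.Nodup := nodup_insert adj node _ h
      have step1 : runA adj (s ++ [node]) ans
          = runA (adj.insert node rest.reverse) ((s ++ [node]) ++ [nxt]) ans := by
        rw [runA, runA, loopA_step, PySem.List.pop?_last]
        simp only [hguard, if_pos]
        simp only [hpopA]
        have hfe : 2 * sizeD (adj.insert node rest.reverse) + ((s ++ [node]) ++ [nxt]).length + 1
            = 2 * sizeD adj + (s ++ [node]).length := by
          simp only [List.length_append, List.length_cons, List.length_nil]
          omega
        rw [hfe]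
        simp only [List.append_assoc, List.cons_append, List.nil_append]
      have hrev1 : revD (adj.insert node rest.reverse) = (revD adj).insert node rest := by
        rw [revD_insert, List.reverse_reverse]
      have step2 := ih (adj.insert node rest.reverse) nxt (s ++ [node]) ans hnd1 (by omega)
      rw [hrev1] at step2
      set p := visitB fB nxt ((revD adj).insert node rest) ans.reverse with hp
      have hrevnd : (revD adj).keys.Nodup := by rw [keys_revD]; exact h
      have hndB : ((revD adj).insert node rest).keys.Nodup := nodup_insert _ _ _ hrevnd
      obtain ⟨hszB, hndp⟩ := visitB_invariant fB nxt ((revD adj).insert node rest) ans.reverse hndB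
      rw [← hp] at hszB hndp
      have hszins : sizeD ((revD adj).insert node rest) + 1 = sizeD (revD adj) := by
        have hgB : (revD adj).getD node [] = nxt :: rest := by rw [getD_revD, hg]
        exact sizeD_consume (revD adj) node nxt rest hrevnd hgB
      have hndRp : (revD p.1).keys.Nodup := by rw [keys_revD]; exact hndp
      have hszRp : 2 * sizeD (revD p.1) + 1 ≤ fB := by
        rw [sizeD_revD]
        rw [sizeD_revD] at hszins
        omega
      have step3 := ih (revD p.1) node s (p.2.reverse) hndRp hszRp
      rw [revD_revD, List.reverse_reverse] at step3
      rw [step1, step2, step3]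

theorem runA_nil (d : PySem.Dict String (List String)) (ans : List String) :
    runA d [] ans = ans := by
  rw [runA, loopA_step, pop?_nil]

-- ===== VERDICT (by name: the statement is the Claim_ definition above) =====
theorem solution_spec : Claim_equal_solution := by
  unfold Claim_equal_solution
  intro tickets _ _
  unfold Spec_solution solution solution_alt
  obtain ⟨hbn, hbs⟩ := build_invariant tickets
  obtain ⟨hn, hs⟩ := sort_invariant _ hbn
  have hsize : sizeD (sortA (buildA tickets)) ≤ tickets.length := by omega
  have h1 : loopA (2 * tickets.length + 2) (sortA (buildA tickets)) ["ICN"] []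
      = runA (sortA (buildA tickets)) ["ICN"] [] :=
    loopA_eq_runA _ _ _ _ hn (by simp only [List.length_cons, List.length_nil]; omega)
  rw [h1]
  have hrs : revD (sortA (buildA tickets)) = sortB (buildB tickets) := by
    rw [sortA_eq_revD_sortB _ hbn, revD_revD, buildA_eq_buildB]
  have h2 := key_sim (2 * tickets.length + 1) (sortA (buildA tickets)) "ICN" [] [] hn (by omega)
  simp only [List.nil_append, List.reverse_nil] at h2
  rw [hrs] at h2
  rw [h2, runA_nil, List.reverse_reverse]
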